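-- pv_equiv track=rewrite | github.com/devKarin/beginner_python | EX/ex03_idcode/idcode.py | get_birth_place
-- ===== SOURCE A (Python) =====
-- def is_valid_birth_number(birth_number: int) -> bool:
--     """Check if given value is correct for birth number in ID code."""
--     # Birth number is valid if it's between 1 and 999 (included).
--     return birth_number in range(1, 1000)
--
-- def get_birth_place(birth_number: int) -> str:
--     """Find the place where the person was born."""
--     # Define birthplaces
--     valid_birth_places = {
--         "Kuressaare": list(range(1, 11)),
--         "Tartu": list(range(11, 21)) + list(range(271, 371)),
--         "Tallinn": list(range(21, 221)) + list(range(471, 711)),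
--         "Kohtla-Järve": list(range(221, 271)),
--         "Narva": list(range(371, 421)),
--         "Pärnu": list(range(421, 471)),
--         "undefined": list(range(711, 1000))
--     }
--
--     # Check whether the input is valid.
--     if is_valid_birth_number(birth_number):
--         # Loop through key-value pairs of valid_birth_places.
--         for key, value in valid_birth_places.items():
--             # If the birth number is present, return birthplace.
--             if birth_number in value:
--                 return key
--     else:
--         return "Wrong input!"
-- ===== SOURCE B (Python) =====
-- def get_birth_place(birth_number: int) -> str:
--     """Find the place where the person was born."""
--     # Same validity guard as A (range membership, so non-int input is still 'Wrong input!').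
--     if birth_number not in range(1, 1000):
--         return "Wrong input!"
--     if birth_number <= 10:
--         return "Kuressaare"
--     if birth_number <= 20 or 271 <= birth_number <= 370:
--         return "Tartu"
--     if birth_number <= 220 or 471 <= birth_number <= 710:
--         return "Tallinn"
--     if birth_number <= 270:
--         return "Kohtla-Järve"
--     if birth_number <= 420:
--         return "Narva"
--     if birth_number <= 470:
--         return "Pärnu"
--     return "undefined"
-- ===== Notes on version B (the rewrite author's own statement) =====
-- stated objective: simpler
-- what changed: Replaced the dict of seven materialised number lists and the items()-loop with linear membership scans by a direct if-chain of range comparisons; no table is built and no loop runs.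
import Mathlib
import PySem

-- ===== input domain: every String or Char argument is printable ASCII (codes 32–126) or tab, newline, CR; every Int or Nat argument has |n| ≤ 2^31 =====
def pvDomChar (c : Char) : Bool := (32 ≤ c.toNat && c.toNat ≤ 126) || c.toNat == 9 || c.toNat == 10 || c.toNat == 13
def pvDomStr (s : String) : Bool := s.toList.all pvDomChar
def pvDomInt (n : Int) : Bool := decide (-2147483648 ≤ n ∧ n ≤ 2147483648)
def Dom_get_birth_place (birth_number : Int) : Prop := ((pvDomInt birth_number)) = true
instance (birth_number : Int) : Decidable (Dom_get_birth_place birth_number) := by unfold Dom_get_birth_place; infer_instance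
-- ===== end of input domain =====

-- B replaces A's dict of number lists + items()-scan loop by a direct if-chain of range comparisons (simpler, no table).

-- ===== PORT A =====
def is_valid_birth_number (birth_number : Int) : Bool :=
  decide (birth_number ∈ PySem.List.pyRange 1 1000 1)

-- the for key,value loop: return key on first list containing birth_number
-- "" stands for Python's implicit None when the loop exhausts; unreachable for valid birth numbers
def pvLoopPlaces (birth_number : Int) : List (String × List Int) → String
  | [] => ""
  | (key, value) :: rest =>
      if birth_number ∈ value then key else pvLoopPlaces birth_number rest

def get_birth_place (birth_number : Int) : String :=
  let valid_birth_places : PySem.Dict String (List Int) := PySem.Dict.ofList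
    [ ("Kuressaare", PySem.List.pyRange 1 11 1)
    , ("Tartu", PySem.List.pyRange 11 21 1 ++ PySem.List.pyRange 271 371 1)
    , ("Tallinn", PySem.List.pyRange 21 221 1 ++ PySem.List.pyRange 471 711 1)
    , ("Kohtla-Järve", PySem.List.pyRange 221 271 1)
    , ("Narva", PySem.List.pyRange 371 421 1)
    , ("Pärnu", PySem.List.pyRange 421 471 1)
    , ("undefined", PySem.List.pyRange 711 1000 1) ]
  if is_valid_birth_number birth_number then
    pvLoopPlaces birth_number valid_birth_places.items
  else
    "Wrong input!"

-- ===== PORT B =====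
def get_birth_place_alt (birth_number : Int) : String :=
  if ¬ (birth_number ∈ PySem.List.pyRange 1 1000 1) then "Wrong input!"
  else if birth_number ≤ 10 then "Kuressaare"
  else if birth_number ≤ 20 ∨ (271 ≤ birth_number ∧ birth_number ≤ 370) then "Tartu"
  else if birth_number ≤ 220 ∨ (471 ≤ birth_number ∧ birth_number ≤ 710) then "Tallinn"
  else if birth_number ≤ 270 then "Kohtla-Järve"
  else if birth_number ≤ 420 then "Narva"
  else if birth_number ≤ 470 then "Pärnu"
  else "undefined"

-- ===== PRECONDITION & SPEC =====
def Spec_get_birth_place (birth_number : Int) (out : String) : Prop := out = get_birth_place_alt birth_number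
instance (birth_number : Int) (out : String) : Decidable (Spec_get_birth_place birth_number out) := by unfold Spec_get_birth_place; infer_instance

-- ===== CLAIM (what is proved, stated in full; the proofs are below) =====
def Claim_equal_get_birth_place : Prop := ∀ (birth_number : Int), Dom_get_birth_place birth_number → Spec_get_birth_place birth_number (get_birth_place birth_number)

-- ===== LEMMAS AND PROOFS =====

-- ===== VERDICT (by name: the statement is the Claim_ definition above) =====
set_option maxRecDepth 100000 in
theorem get_birth_place_spec : Claim_equal_get_birth_place := by
  intro n _
  unfold Spec_get_birth_place get_birth_place get_birth_place_alt is_valid_birth_number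
  have hitems : (PySem.Dict.ofList
      [ ("Kuressaare", PySem.List.pyRange 1 11 1)
      , ("Tartu", PySem.List.pyRange 11 21 1 ++ PySem.List.pyRange 271 371 1)
      , ("Tallinn", PySem.List.pyRange 21 221 1 ++ PySem.List.pyRange 471 711 1)
      , ("Kohtla-Järve", PySem.List.pyRange 221 271 1)
      , ("Narva", PySem.List.pyRange 371 421 1)
      , ("Pärnu", PySem.List.pyRange 421 471 1)
      , ("undefined", PySem.List.pyRange 711 1000 1) ]).items =
      [ ("Kuressaare", PySem.List.pyRange 1 11 1)
      , ("Tartu", PySem.List.pyRange 11 21 1 ++ PySem.List.pyRange 271 371 1)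
      , ("Tallinn", PySem.List.pyRange 21 221 1 ++ PySem.List.pyRange 471 711 1)
      , ("Kohtla-Järve", PySem.List.pyRange 221 271 1)
      , ("Narva", PySem.List.pyRange 371 421 1)
      , ("Pärnu", PySem.List.pyRange 421 471 1)
      , ("undefined", PySem.List.pyRange 711 1000 1) ] := by decide
  simp only [hitems, pvLoopPlaces, List.mem_append, PySem.List.mem_pyRange_one,
    decide_eq_true_eq]
  split_ifs <;> first | rfl | omega
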